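-- pv_equiv track=rewrite | github.com/manwar/perlweeklychallenge-club | challenge-149/lubos-kolouch/python/ch-2.py | _digits_unique
-- ===== SOURCE A (Python) =====
-- def _digits_unique(n: int, base: int) -> bool:
--     seen = [0] * base
--     x = n
--     while x > 0:
--         d = x % base
--         seen[d] += 1
--         if seen[d] > 1:
--             return False
--         x //= base
--     return True
-- ===== SOURCE B (Python) =====
-- def _digits_unique(n: int, base: int) -> bool:
--     digits = []
--     x = n
--     while x > 0:
--         if len(digits) == base:
--             # pigeonhole: base digits already collected and more remain -> a repeat is certain
--             return False
--         digits.append(x % base)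
--         x //= base
--     digits.sort()
--     return all(a != b for a, b in zip(digits, digits[1:]))
-- ===== Notes on version B (the rewrite author's own statement) =====
-- stated objective: alternative
-- what changed: B replaces A's per-base count array with in-loop duplicate counting and early exit by a pigeonhole-bounded digit extraction (at most base+1 iterations) followed by a separate sort-and-adjacent-scan pass that decides uniqueness.
import Mathlib
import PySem

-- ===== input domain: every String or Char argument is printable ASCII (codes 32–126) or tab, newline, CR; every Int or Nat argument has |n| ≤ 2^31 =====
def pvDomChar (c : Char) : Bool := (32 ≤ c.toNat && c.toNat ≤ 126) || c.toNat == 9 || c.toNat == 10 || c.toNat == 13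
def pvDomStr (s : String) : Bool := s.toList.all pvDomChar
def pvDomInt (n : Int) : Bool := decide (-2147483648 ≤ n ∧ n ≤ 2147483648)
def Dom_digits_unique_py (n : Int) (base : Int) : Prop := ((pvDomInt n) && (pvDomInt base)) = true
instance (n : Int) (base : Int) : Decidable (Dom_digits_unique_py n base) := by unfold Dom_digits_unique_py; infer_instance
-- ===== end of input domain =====

-- B drops A's per-base count array and in-loop duplicate counting: it extracts digits with a
-- pigeonhole cutoff (more than `base` digits forces a repeat) and then decides uniqueness by
-- sorting the digits and scanning adjacent pairs (objective: alternative). Pre_ excludes only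
-- n > 0 with base ≤ 0, where A raises.


-- ===== PORT A =====
-- A's while loop; fuel only to make it total (under Pre_ the loop runs fewer than fuel times)
def duLoopA (base : Int) (seen : List Int) (x : Int) : Nat → Bool
  | 0 => true
  | fuel + 1 =>
    if x > 0 then
      let d := PySem.Int.mod x base
      -- seen[d] += 1
      let seen' := PySem.List.pySetD seen d (PySem.List.pyGetD seen d 0 + 1)
      if PySem.List.pyGetD seen' d 0 > 1 then false
      else duLoopA base seen' (PySem.Int.floordiv x base) fuel
    else true

def digits_unique_py (n : Int) (base : Int) : Bool :=
  duLoopA base (List.replicate base.toNat 0) n (n.toNat + 1)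

-- ===== PORT B =====
-- B's extraction loop: none = early `return False` (pigeonhole cutoff), some = collected digits
def duLoopB (base : Int) (digits : List Int) (x : Int) : Nat → Option (List Int)
  | 0 => some digits
  | fuel + 1 =>
    if x > 0 then
      if PySem.List.len digits == base then none
      else duLoopB base (digits ++ [PySem.Int.mod x base]) (PySem.Int.floordiv x base) fuel
    else some digits

-- all(a != b for a, b in zip(digits, digits[1:]))
def adjAllNe : List Int → Bool
  | a :: b :: rest => if a == b then false else adjAllNe (b :: rest)
  | _ => true

def digits_unique_py_alt (n : Int) (base : Int) : Bool :=
  match duLoopB base [] n (n.toNat + 1) with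
  | none => false
  | some digits => adjAllNe (PySem.List.sorted digits (fun x => x) false)

-- ===== PRECONDITION & SPEC =====
-- Pre_ excludes exactly n > 0 with base ≤ 0, where A raises
-- (ZeroDivisionError for base = 0, IndexError for base < 0).
def Pre_digits_unique_py (n : Int) (base : Int) : Prop := n ≤ 0 ∨ 1 ≤ base
instance (n : Int) (base : Int) : Decidable (Pre_digits_unique_py n base) := by
  unfold Pre_digits_unique_py; infer_instance
def pvWitness_digits_unique_py : Int × Int := (121, 10)

def Spec_digits_unique_py (n : Int) (base : Int) (out : Bool) : Prop := out = digits_unique_py_alt n base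
instance (n : Int) (base : Int) (out : Bool) : Decidable (Spec_digits_unique_py n base out) := by unfold Spec_digits_unique_py; infer_instance

-- ===== CLAIM (what is proved, stated in full; the proofs are below) =====
def Claim_equal_digits_unique_py : Prop := ∀ (n : Int) (base : Int), Dom_digits_unique_py n base → Pre_digits_unique_py n base → Spec_digits_unique_py n base (digits_unique_py n base)

-- ===== LEMMAS AND PROOFS =====

-- the mathematical digit list both loops traverse (same fuel discipline as the ports)
def duDigs (base : Int) (x : Int) : Nat → List Int
  | 0 => []
  | fuel + 1 =>
    if x > 0 then PySem.Int.mod x base :: duDigs base (PySem.Int.floordiv x base) fuel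
    else []

lemma duDigs_bounds (base : Int) (hb : 1 ≤ base) (x : Int) (fuel : Nat) :
    ∀ e ∈ duDigs base x fuel, 0 ≤ e ∧ e < base := by
  induction fuel generalizing x with
  | zero => simp [duDigs]
  | succ fuel ih =>
    intro e he
    simp only [duDigs] at he
    split at he
    · rcases List.mem_cons.mp he with rfl | h
      · exact ⟨PySem.Int.mod_nonneg _ (by omega), PySem.Int.mod_lt _ (by omega)⟩
      · exact ih _ e h
    · simp at he

-- B's loop either finishes with exactly the digit list, or cuts off with strictly
-- more than `base` digits in total (pigeonhole trigger)
lemma duLoopB_spec (base : Int) (fuel : Nat) :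
    ∀ (x : Int) (acc : List Int),
      duLoopB base acc x fuel = some (acc ++ duDigs base x fuel) ∨
      (duLoopB base acc x fuel = none ∧ 0 ≤ base ∧
        (base.toNat : Int) < ((acc ++ duDigs base x fuel).length : Int)) := by
  induction fuel with
  | zero => intro x acc; left; simp [duLoopB, duDigs]
  | succ fuel ih =>
    intro x acc
    by_cases hx : x > 0
    · simp only [duLoopB, duDigs, if_pos hx]
      by_cases hlen : PySem.List.len acc == base
      · right
        have hl : (acc.length : Int) = base := by
          simpa [PySem.List.len] using (beq_iff_eq.mp hlen)
        refine ⟨by rw [if_pos hlen], by omega, ?_⟩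
        simp only [List.length_append, List.length_cons]
        push_cast
        omega
      · rw [if_neg hlen]
        rcases ih (PySem.Int.floordiv x base) (acc ++ [PySem.Int.mod x base]) with h | ⟨h1, h2, h3⟩
        · left; rw [h]; simp
        · right
          refine ⟨h1, h2, ?_⟩
          simpa using h3
    · left; simp [duLoopB, duDigs, hx]

-- pigeonhole: a duplicate-free list of integers in [0, base) has at most base.toNat elements
lemma nodup_length_le (l : List Int) (b : Int) (hbound : ∀ e ∈ l, 0 ≤ e ∧ e < b)
    (hnd : l.Nodup) : l.length ≤ b.toNat := by
  have hsub : l.toFinset ⊆ Finset.Ico 0 b := by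
    intro e he
    rcases hbound e (List.mem_toFinset.mp he) with ⟨h0, h1⟩
    exact Finset.mem_Ico.mpr ⟨h0, h1⟩
  have hcard := Finset.card_le_card hsub
  rw [List.toFinset_card_of_nodup hnd, Int.card_Ico] at hcard
  omega

-- the adjacent-pair scan on a ≤-sorted list decides duplicate-freeness
lemma adjAllNe_sorted (st : List Int) (hp : st.Pairwise (· ≤ ·)) :
    adjAllNe st = decide st.Nodup := by
  induction st with
  | nil => simp [adjAllNe]
  | cons a rest ih =>
    match rest, hp with
    | [], _ => simp [adjAllNe]
    | b :: t, hp =>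
      have hab : a ≤ b := (List.pairwise_cons.mp hp).1 b (by simp)
      have hat : ∀ y ∈ t, a ≤ y := fun y hy =>
        (List.pairwise_cons.mp hp).1 y (by simp [hy])
      have hrest := ih (List.pairwise_cons.mp hp).2
      simp only [adjAllNe]
      by_cases heq : a = b
      · rw [if_pos (by simpa using heq)]
        have : ¬ (a :: b :: t).Nodup := by
          intro h
          exact (List.nodup_cons.mp h).1 (by simp [heq])
        simp [this]
      · rw [if_neg (by simpa using heq), hrest]
        have hbt : ∀ y ∈ b :: t, b ≤ y → True := fun _ _ _ => trivial
        have hanotin : a ∉ b :: t := by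
          intro hmem
          rcases List.mem_cons.mp hmem with rfl | hmem'
          · exact heq rfl
          · have hb := (List.pairwise_cons.mp (List.pairwise_cons.mp hp).2).1
            have : b ≤ a := hb a hmem'
            have : a < b := lt_of_le_of_ne hab heq
            omega
        congr 1
        rw [eq_iff_iff]
        constructor
        · intro h; exact List.nodup_cons.mpr ⟨hanotin, h⟩
        · intro h; exact (List.nodup_cons.mp h).2

-- B returns true exactly when the digit list is duplicate-free (base ≥ 1)
lemma alt_eq_nodup (n : Int) (base : Int) (hb : 1 ≤ base) :
    digits_unique_py_alt n base =
      decide (duDigs base n (n.toNat + 1)).Nodup := by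
  unfold digits_unique_py_alt
  rcases duLoopB_spec base (n.toNat + 1) n [] with h | ⟨h1, _, h3⟩
  · rw [h]
    simp only [List.nil_append]
    set ds := duDigs base n (n.toNat + 1) with hds
    rw [adjAllNe_sorted _ (by simpa using PySem.List.sorted_pairwise ds (fun x => x) )]
    congr 1
    rw [eq_iff_iff]
    have hperm : (PySem.List.sorted ds (fun x => x) false).Perm ds :=
      PySem.List.sorted_perm ds (fun x => x) false
    exact ⟨fun hnd => hperm.nodup_iff.mp hnd, fun hnd => hperm.nodup_iff.mpr hnd⟩
  · rw [h1]
    simp only [List.nil_append] at h3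
    have : ¬ (duDigs base n (n.toNat + 1)).Nodup := by
      intro hnd
      have := nodup_length_le _ base (duDigs_bounds base hb n (n.toNat + 1)) hnd
      omega
    simp [this]

-- A's loop, characterised (base ≥ 2): given a 0/1 count array, it returns true exactly
-- when the remaining digits are duplicate-free and unseen so far
lemma duLoopA_eq (base : Int) (hb : 2 ≤ base) (fuel : Nat) :
    ∀ (x : Int) (seen : List Int), seen.length = base.toNat →
      (∀ i, seen.getD i 0 = 0 ∨ seen.getD i 0 = 1) →
      (duLoopA base seen x fuel =
        decide ((duDigs base x fuel).Nodup ∧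
          ∀ e ∈ duDigs base x fuel, seen.getD e.toNat 0 = 0)) := by
  induction fuel with
  | zero => intro x seen _ _; simp [duLoopA, duDigs]
  | succ fuel ih =>
    intro x seen hlen hvals
    by_cases hx : x > 0
    · have hd0 : 0 ≤ PySem.Int.mod x base := PySem.Int.mod_nonneg _ (by omega)
      have hdlt : PySem.Int.mod x base < base := PySem.Int.mod_lt _ (by omega)
      have hdn : (PySem.Int.mod x base).toNat < seen.length := by omega
      have hset : PySem.List.pySetD seen (PySem.Int.mod x base)
            (PySem.List.pyGetD seen (PySem.Int.mod x base) 0 + 1)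
          = seen.set (PySem.Int.mod x base).toNat
              (seen.getD (PySem.Int.mod x base).toNat 0 + 1) := by
        rw [PySem.List.pySetD_of_nonneg _ _ hd0,
            PySem.List.pyGetD_eq_getElem _ _ hd0 (by omega),
            List.getD_eq_getElem _ _ hdn]
      have hget : PySem.List.pyGetD
            (seen.set (PySem.Int.mod x base).toNat
              (seen.getD (PySem.Int.mod x base).toNat 0 + 1))
            (PySem.Int.mod x base) 0
          = seen.getD (PySem.Int.mod x base).toNat 0 + 1 := by
        rw [PySem.List.pyGetD_eq_getElem _ _ hd0 (by simp; omega)]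
        exact List.getElem_set_self (by simpa using hdn)
      simp only [duLoopA, duDigs, if_pos hx, hset, hget]
      rcases hvals (PySem.Int.mod x base).toNat with h0 | h1
      · -- count 0: no early exit, recurse
        rw [if_neg (by omega)]
        have hvals' : ∀ i, (seen.set (PySem.Int.mod x base).toNat
            (seen.getD (PySem.Int.mod x base).toNat 0 + 1)).getD i 0 = 0 ∨
            (seen.set (PySem.Int.mod x base).toNat
            (seen.getD (PySem.Int.mod x base).toNat 0 + 1)).getD i 0 = 1 := by
          intro i
          by_cases hilen : i < seen.length
          · rw [List.getD_eq_getElem _ _ (by simpa using hilen)]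
            by_cases hieq : (PySem.Int.mod x base).toNat = i
            · right
              rw [List.getElem_set, if_pos hieq, h0]
              omega
            · rw [List.getElem_set, if_neg hieq, ← List.getD_eq_getElem _ _ hilen]
              exact hvals i
          · left
            rw [List.getD_eq_default]
            simpa using hilen
        rw [ih (PySem.Int.floordiv x base) _ (by simpa using hlen) hvals']
        congr 1
        rw [eq_iff_iff]
        have hbnd := duDigs_bounds base (by omega) (PySem.Int.floordiv x base) fuel
        have hgd : ∀ e, 0 ≤ e → e < base →
            (seen.set (PySem.Int.mod x base).toNat
              (seen.getD (PySem.Int.mod x base).toNat 0 + 1)).getD e.toNat 0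
            = if e = PySem.Int.mod x base then seen.getD e.toNat 0 + 1
              else seen.getD e.toNat 0 := by
          intro e he0 helt
          have helen : e.toNat < seen.length := by omega
          rw [List.getD_eq_getElem _ _ (by simpa using helen), List.getElem_set]
          by_cases heq : e = PySem.Int.mod x base
          · rw [if_pos (by omega), if_pos heq, heq, List.getD_eq_getElem _ _ hdn]
          · rw [if_neg (by omega), if_neg heq, List.getD_eq_getElem _ _ helen]
        constructor
        · rintro ⟨hnd, hall⟩
          have hdnot : PySem.Int.mod x base ∉ duDigs base (PySem.Int.floordiv x base) fuel := by
            intro hmem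
            have := hall _ hmem
            rw [hgd _ hd0 hdlt, if_pos rfl] at this
            omega
          refine ⟨List.nodup_cons.mpr ⟨hdnot, hnd⟩, ?_⟩
          intro e he
          rcases List.mem_cons.mp he with rfl | he'
          · exact h0
          · obtain ⟨he0, helt⟩ := hbnd e he'
            have hne : e ≠ PySem.Int.mod x base := fun heq => hdnot (heq ▸ he')
            have := hall e he'
            rwa [hgd e he0 helt, if_neg hne] at this
        · rintro ⟨hnd, hall⟩
          have hdnot := (List.nodup_cons.mp hnd).1
          refine ⟨(List.nodup_cons.mp hnd).2, ?_⟩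
          intro e he
          obtain ⟨he0, helt⟩ := hbnd e he
          have hne : e ≠ PySem.Int.mod x base := fun heq => hdnot (heq ▸ he)
          rw [hgd e he0 helt, if_neg hne]
          exact hall e (List.mem_cons_of_mem _ he)
      · -- count already 1: early exit, and the head digit is already seen
        rw [if_pos (by omega)]
        have hcontra : ¬ ((PySem.Int.mod x base ::
              duDigs base (PySem.Int.floordiv x base) fuel).Nodup ∧
            ∀ e ∈ PySem.Int.mod x base :: duDigs base (PySem.Int.floordiv x base) fuel,
              seen.getD e.toNat 0 = 0) := by
          rintro ⟨-, hall⟩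
          have := hall _ List.mem_cons_self
          omega
        rw [decide_eq_false hcontra]
    · simp [duLoopA, duDigs, hx]

-- A returns true exactly when the digit list is duplicate-free (base ≥ 2)
lemma a_eq_nodup (n : Int) (base : Int) (hb : 2 ≤ base) :
    digits_unique_py n base = decide (duDigs base n (n.toNat + 1)).Nodup := by
  rw [digits_unique_py,
    duLoopA_eq base hb (n.toNat + 1) n (List.replicate base.toNat 0) (by simp)
      (fun i => by
        by_cases h : i < base.toNat
        · left; rw [List.getD_eq_getElem _ _ (by simpa using h)]; simp
        · left; rw [List.getD_eq_default]; simpa using h)]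
  congr 1
  rw [eq_iff_iff]
  constructor
  · exact fun h => h.1
  · intro h
    refine ⟨h, fun e he => ?_⟩
    obtain ⟨he0, helt⟩ := duDigs_bounds base (by omega) n (n.toNat + 1) e he
    rw [List.getD_eq_getElem _ _ (by simp; omega)]
    simp

-- base = 1, n > 0: both return false (second digit 0 repeats / pigeonhole trigger)
lemma both_false_base_one (n : Int) (hn : 0 < n) :
    digits_unique_py n 1 = false ∧ digits_unique_py_alt n 1 = false := by
  have hm : PySem.Int.mod n 1 = 0 := by
    have := PySem.Int.mod_nonneg n (b := 1) (by omega)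
    have := PySem.Int.mod_lt n (b := 1) (by omega)
    omega
  have hf : PySem.Int.floordiv n 1 = n := by
    have := PySem.Int.floordiv_mul_add_mod n 1
    omega
  obtain ⟨m, hmn⟩ : ∃ m, n.toNat = m + 1 := ⟨n.toNat - 1, by omega⟩
  constructor
  · show duLoopA 1 (List.replicate (1:Int).toNat 0) n (n.toNat + 1) = false
    rw [hmn]
    simp only [duLoopA, if_pos hn, hm, hf]
    norm_num [PySem.List.pySetD, PySem.List.pyGetD, PySem.List.pyIdx?]
    intro _ h
    exact absurd h (by decide)
  · show (match duLoopB 1 [] n (n.toNat + 1) with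
        | none => false
        | some digits => adjAllNe (PySem.List.sorted digits (fun x => x) false)) = false
    rw [hmn]
    simp only [duLoopB, if_pos hn, hm, hf]
    norm_num [PySem.List.len]

-- ===== VERDICT (by name: the statement is the Claim_ definition above) =====
theorem digits_unique_py_spec : Claim_equal_digits_unique_py := by
  intro n base _ hpre
  unfold Spec_digits_unique_py
  by_cases hn : n ≤ 0
  · have hx : ¬ n > 0 := by omega
    simp [digits_unique_py, digits_unique_py_alt, duLoopA, duLoopB, adjAllNe,
      PySem.List.sorted, hx]
  · rcases hpre with h | h
    · omega
    · by_cases hb1 : base = 1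
      · subst hb1
        obtain ⟨ha, hbb⟩ := both_false_base_one n (by omega)
        rw [ha, hbb]
      · have hb : 2 ≤ base := by omega
        rw [a_eq_nodup n base hb, alt_eq_nodup n base (by omega)]
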